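-- pv_equiv track=rewrite | github.com/MoonSolo/music_gen | scripts/generate.py | group_into_parts
-- ===== SOURCE A (Python) =====
-- def group_into_parts(entries, min_part_sec=120, max_part_sec=360):
--     """
--     Groups consecutive entries into parts where each part's
--     total duration is between min_part_sec and max_part_sec.
--     """
--     parts     = []
--     current   = []
--     current_t = 0
--
--     for entry in entries:
--         d = entry["duration"]
--         # If adding this clip would exceed max, start a new part
--         if current and (current_t + d > max_part_sec):
--             parts.append(current)
--             current   = []
--             current_t = 0
--         current.append(entry)
--         current_t += d
--
--     if current:
--         parts.append(current)
--
--     return parts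
-- ===== SOURCE B (Python) =====
-- def group_into_parts(entries, min_part_sec=120, max_part_sec=360):
--     parts = []
--     n = len(entries)
--     i = 0
--     while i < n:
--         total = entries[i]["duration"]
--         j = i + 1
--         while j < n and total + entries[j]["duration"] <= max_part_sec:
--             total += entries[j]["duration"]
--             j += 1
--         parts.append(entries[i:j])
--         i = j
--     return parts
-- ===== Notes on version B (the rewrite author's own statement) =====
-- stated objective: alternative
-- what changed: Replaced A's single fold carrying (parts, current, current_t) accumulators plus a trailing flush with an outer loop that, for each part, scans forward to find the greedy end index and slices the entries list directly; no mutable current-part state or final flush.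
import Mathlib
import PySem

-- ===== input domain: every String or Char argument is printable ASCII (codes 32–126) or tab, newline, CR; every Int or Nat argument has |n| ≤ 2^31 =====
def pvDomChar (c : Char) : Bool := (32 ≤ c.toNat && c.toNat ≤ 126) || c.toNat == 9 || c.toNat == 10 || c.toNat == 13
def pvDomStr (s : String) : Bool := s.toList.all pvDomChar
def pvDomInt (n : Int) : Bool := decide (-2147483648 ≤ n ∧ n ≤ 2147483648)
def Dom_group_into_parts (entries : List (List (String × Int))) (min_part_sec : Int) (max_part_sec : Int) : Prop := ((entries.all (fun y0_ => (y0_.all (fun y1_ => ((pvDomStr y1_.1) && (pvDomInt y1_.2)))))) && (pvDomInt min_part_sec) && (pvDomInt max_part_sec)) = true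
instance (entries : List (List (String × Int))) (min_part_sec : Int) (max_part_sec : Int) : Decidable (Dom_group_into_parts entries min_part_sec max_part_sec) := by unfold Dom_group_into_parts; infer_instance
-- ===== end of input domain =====

-- ===== PORT A =====
-- B restructures A's accumulator fold into an outer part loop with a greedy forward scan and slicing (objective: alternative decomposition).
-- entry["duration"] (KeyError when absent -> excluded by Pre_; the port reads getD 0 there)
def pvDur (e : List (String × Int)) : Int := ((PySem.Dict.mk e).get? "duration").getD 0

-- one iteration of A's for-loop over state (parts, current, current_t)
def gipStep (max_part_sec : Int)
    (st : List (List (List (String × Int))) × List (List (String × Int)) × Int)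
    (entry : List (String × Int)) :
    List (List (List (String × Int))) × List (List (String × Int)) × Int :=
  let d := pvDur entry
  let (parts, current, current_t) := st
  if current ≠ [] ∧ current_t + d > max_part_sec then
    (parts ++ [current], [entry], d)          -- flush; then current=[]+append entry, current_t=0+d
  else
    (parts, current ++ [entry], current_t + d)

def group_into_parts (entries : List (List (String × Int))) (min_part_sec : Int) (max_part_sec : Int) : List (List (List (String × Int))) :=
  let fin := entries.foldl (gipStep max_part_sec) ([], [], 0)
  if fin.2.1 ≠ [] then fin.1 ++ [fin.2.1] else fin.1

-- ===== PORT B =====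
-- inner while loop of Source B: how many further entries fit on top of `total`
def gipSpan (max_part_sec : Int) (total : Int) : List (List (String × Int)) → Nat
  | [] => 0
  | e :: rest =>
    if total + pvDur e ≤ max_part_sec then gipSpan max_part_sec (total + pvDur e) rest + 1
    else 0

-- outer while loop of Source B: slice off one part at a time
def group_into_parts_alt (entries : List (List (String × Int))) (min_part_sec : Int) (max_part_sec : Int) : List (List (List (String × Int))) :=
  match entries with
  | [] => []
  | e :: rest =>
    let k := gipSpan max_part_sec (pvDur e) rest
    (e :: rest.take k) :: group_into_parts_alt (rest.drop k) min_part_sec max_part_sec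
termination_by entries.length
decreasing_by simp only [List.length_cons, List.length_drop]; omega

-- ===== PRECONDITION & SPEC =====
-- Pre_ excludes exactly the entries lacking a "duration" key, on which Python A raises KeyError.
def Pre_group_into_parts (entries : List (List (String × Int))) (min_part_sec : Int) (max_part_sec : Int) : Prop :=
  ∀ e ∈ entries, ((PySem.Dict.mk e).get? "duration").isSome = true
instance (entries : List (List (String × Int))) (min_part_sec : Int) (max_part_sec : Int) : Decidable (Pre_group_into_parts entries min_part_sec max_part_sec) := by unfold Pre_group_into_parts; infer_instance
def pvWitness_group_into_parts : (List (List (String × Int))) × Int × Int :=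
  ([[("duration", 100)], [("duration", 300)], [("duration", 50)]], 120, 360)

def Spec_group_into_parts (entries : List (List (String × Int))) (min_part_sec : Int) (max_part_sec : Int) (out : List (List (List (String × Int)))) : Prop := out = group_into_parts_alt entries min_part_sec max_part_sec
instance (entries : List (List (String × Int))) (min_part_sec : Int) (max_part_sec : Int) (out : List (List (List (String × Int)))) : Decidable (Spec_group_into_parts entries min_part_sec max_part_sec out) := by unfold Spec_group_into_parts; infer_instance

-- ===== CLAIM (what is proved, stated in full; the proofs are below) =====
def Claim_equal_group_into_parts : Prop := ∀ (entries : List (List (String × Int))) (min_part_sec : Int) (max_part_sec : Int), Dom_group_into_parts entries min_part_sec max_part_sec → Pre_group_into_parts entries min_part_sec max_part_sec → Spec_group_into_parts entries min_part_sec max_part_sec (group_into_parts entries min_part_sec max_part_sec)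

-- ===== LEMMAS AND PROOFS =====
-- A's run from a non-empty current group, written as a direct recursion
def gipGlue (M : Int) (c : List (List (String × Int))) (t : Int) : List (List (String × Int)) → List (List (List (String × Int)))
  | [] => [c]
  | e :: l =>
    if t + pvDur e > M then c :: gipGlue M [e] (pvDur e) l
    else gipGlue M (c ++ [e]) (t + pvDur e) l

lemma gip_fold (M : Int) (l : List (List (String × Int))) : ∀ p c t, c ≠ [] →
    (if (l.foldl (gipStep M) (p, c, t)).2.1 ≠ [] then
      (l.foldl (gipStep M) (p, c, t)).1 ++ [(l.foldl (gipStep M) (p, c, t)).2.1]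
     else (l.foldl (gipStep M) (p, c, t)).1) = p ++ gipGlue M c t l := by
  induction l with
  | nil => intro p c t hc; simp [gipGlue, hc]
  | cons e l ih =>
    intro p c t hc
    by_cases hd : t + pvDur e > M
    · have hstep : gipStep M (p, c, t) e = (p ++ [c], [e], pvDur e) := by
        simp [gipStep, hc, hd]
      rw [List.foldl_cons, hstep, ih (p ++ [c]) [e] (pvDur e) (by simp)]
      simp [gipGlue, hd]
    · have hstep : gipStep M (p, c, t) e = (p, c ++ [e], t + pvDur e) := by
        simp [gipStep, hd]
      rw [List.foldl_cons, hstep, ih p (c ++ [e]) (t + pvDur e) (by simp)]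
      simp [gipGlue, hd]

lemma gip_glue_alt (M m : Int) (l : List (List (String × Int))) : ∀ c t,
    gipGlue M c t l =
      (c ++ l.take (gipSpan M t l)) :: group_into_parts_alt (l.drop (gipSpan M t l)) m M := by
  induction l with
  | nil => intro c t; simp [gipGlue, gipSpan, group_into_parts_alt]
  | cons e l ih =>
    intro c t
    by_cases hd : t + pvDur e > M
    · have hs : gipSpan M t (e :: l) = 0 := by simp [gipSpan]; omega
      rw [hs]
      simp only [gipGlue, hd, if_pos, ih, List.take_zero, List.append_nil, List.drop_zero]
      rw [group_into_parts_alt]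
      simp
    · have hle : t + pvDur e ≤ M := by omega
      have hs : gipSpan M t (e :: l) = gipSpan M (t + pvDur e) l + 1 := by
        simp [gipSpan, hle]
      rw [hs]
      simp only [gipGlue, hd, ih (c ++ [e]) (t + pvDur e), List.take_succ_cons,
        List.drop_succ_cons, List.append_assoc, List.singleton_append, if_false]

-- ===== VERDICT (by name: the statement is the Claim_ definition above) =====
theorem group_into_parts_spec : Claim_equal_group_into_parts := by
  intro entries m M _ _
  unfold Spec_group_into_parts
  cases entries with
  | nil => simp [group_into_parts, group_into_parts_alt]
  | cons e rest =>
    have h0 : gipStep M ([], [], 0) e = ([], [e], pvDur e) := by simp [gipStep]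
    show (if _ ≠ [] then _ else _) = _
    rw [show ((e :: rest).foldl (gipStep M) ([], [], 0)) = rest.foldl (gipStep M) ([], [e], pvDur e) by
          rw [List.foldl_cons, h0]]
    rw [gip_fold M rest [] [e] (pvDur e) (by simp)]
    rw [gip_glue_alt M m rest [e] (pvDur e), group_into_parts_alt]
    simp
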